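-- pv_equiv track=rewrite | github.com/nedaktov-ops/StenoMD | skills/skills/stenomd-analytics/analytics.py | sessions_by_month
-- ===== SOURCE A (Python) =====
-- from collections import Counter
--
-- def sessions_by_month(entities):
--     """Group sessions by month."""
--     by_month = Counter()
--     for s in entities.get("sessions", []):
--         date = s.get("date", "")
--         if date:
--             month = date[:7]
--             by_month[month] += 1
--
--     return sorted(by_month.items(), reverse=True)
-- ===== SOURCE B (Python) =====
-- def sessions_by_month(entities):
--     """Group sessions by month."""
--     months = sorted(s.get("date", "")[:7]
--                     for s in entities.get("sessions", [])
--                     if s.get("date", ""))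
--     result = []
--     for m in months:
--         if result and result[-1][0] == m:
--             result[-1] = (m, result[-1][1] + 1)
--         else:
--             result.append((m, 1))
--     result.reverse()
--     return result
-- ===== Notes on version B (the rewrite author's own statement) =====
-- stated objective: alternative
-- what changed: Replaces the Counter-then-sort-descending pipeline with sort-first: collect the month prefixes, sort them, count runs of equal months in one pass with run-length encoding, and reverse the ascending run list.
import Mathlib
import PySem

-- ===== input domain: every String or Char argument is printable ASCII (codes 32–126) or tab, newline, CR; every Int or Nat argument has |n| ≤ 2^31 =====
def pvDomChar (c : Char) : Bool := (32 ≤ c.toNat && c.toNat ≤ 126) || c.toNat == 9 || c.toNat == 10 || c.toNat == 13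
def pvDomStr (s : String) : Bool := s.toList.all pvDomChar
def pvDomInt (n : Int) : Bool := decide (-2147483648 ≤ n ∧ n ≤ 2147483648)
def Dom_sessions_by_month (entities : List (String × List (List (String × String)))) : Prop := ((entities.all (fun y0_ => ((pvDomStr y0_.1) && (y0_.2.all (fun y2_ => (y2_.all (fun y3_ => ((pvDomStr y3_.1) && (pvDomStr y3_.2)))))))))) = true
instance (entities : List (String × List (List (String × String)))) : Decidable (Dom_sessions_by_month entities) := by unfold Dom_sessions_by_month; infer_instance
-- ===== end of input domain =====

-- B replaces A's Counter-then-sort-descending pipeline by sort-first: sort the month list,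
-- count runs of equal months in one pass, reverse the ascending run list (alternative decomposition).

-- ===== PORT A =====
-- hand-ported piece: Python's tuple comparison for sorted(pairs, reverse=True) — 'before a b' means
-- "a is placed before b when reverse=True", i.e. b < a lexicographically on (str, int); exact for these pairs
def pyPairRevBefore (a b : String × Int) : Bool :=
  decide (b.1 < a.1) || (b.1 == a.1 && decide (b.2 < a.2))

def sessions_by_month (entities : List (String × List (List (String × String)))) : List (String × Int) :=
  let by_month : PySem.Dict String Int :=
    ((PySem.Dict.mk entities).getD "sessions" []).foldl
      (fun d s =>
        let date := (PySem.Dict.mk s).getD "date" ""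
        if date != "" then d.modify (PySem.Str.slice date none (some 7)) 0 (· + 1) else d)
      PySem.Dict.empty
  -- sorted(by_month.items(), reverse=True): the insertion sort of PySem.List.sorted with the tuple comparison
  by_month.items.foldl (fun acc x => PySem.List.insertBy pyPairRevBefore x acc) []

-- ===== PORT B =====
def sessions_by_month_alt (entities : List (String × List (List (String × String)))) : List (String × Int) :=
  let months : List String := PySem.List.sorted
    ((((PySem.Dict.mk entities).getD "sessions" []).filter
        (fun s => (PySem.Dict.mk s).getD "date" "" != "")).map
      (fun s => PySem.Str.slice ((PySem.Dict.mk s).getD "date" "") none (some 7)))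
    (fun x => x)
  let result : List (String × Int) := months.foldl
    (fun res m =>
      match res.getLast? with
      | some last => if last.1 == m then res.dropLast ++ [(m, last.2 + 1)] else res ++ [(m, (1 : Int))]
      | none => res ++ [(m, (1 : Int))])
    []
  result.reverse

-- ===== PRECONDITION & SPEC =====
def Spec_sessions_by_month (entities : List (String × List (List (String × String)))) (out : List (String × Int)) : Prop := out = sessions_by_month_alt entities
instance (entities : List (String × List (List (String × String)))) (out : List (String × Int)) : Decidable (Spec_sessions_by_month entities out) := by unfold Spec_sessions_by_month; infer_instance

-- ===== CLAIM (what is proved, stated in full; the proofs are below) =====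
def Claim_equal_sessions_by_month : Prop := ∀ (entities : List (String × List (List (String × String)))), Dom_sessions_by_month entities → Spec_sessions_by_month entities (sessions_by_month entities)

-- ===== LEMMAS AND PROOFS =====

-- A's conditional modify-loop over sessions is the counting loop over the filtered/mapped month list
theorem foldl_modify_filter_map {σ : Type} (p : σ → Bool) (f : σ → String) :
    ∀ (l : List σ) (d : PySem.Dict String Int),
      l.foldl (fun d s => if p s then d.modify (f s) 0 (· + 1) else d) d
        = ((l.filter p).map f).foldl (fun d x => d.modify x 0 (· + 1)) d := by
  intro l
  induction l with
  | nil => intro d; rfl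
  | cons s t ih =>
    intro d
    by_cases hp : p s
    · simp [hp, ih]
    · simp [hp, ih]

-- insertBy only looks at comparisons of the inserted element against accumulator members
theorem insertBy_congr {α : Type} (b₁ b₂ : α → α → Bool) (x : α) :
    ∀ (acc : List α), (∀ y ∈ acc, b₁ x y = b₂ x y) →
      PySem.List.insertBy b₁ x acc = PySem.List.insertBy b₂ x acc := by
  intro acc
  induction acc with
  | nil => intro _; rfl
  | cons y ys ih =>
    intro h
    have hy := h y (by simp)
    simp only [PySem.List.insertBy, hy]
    by_cases hb : b₂ x y
    · simp [hb]
    · simp [hb, ih (fun z hz => h z (by simp [hz]))]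

theorem foldl_insertBy_congr {α : Type} (b₁ b₂ : α → α → Bool) :
    ∀ (l acc : List α), (∀ a ∈ l, ∀ y, (y ∈ acc ∨ y ∈ l) → b₁ a y = b₂ a y) →
      l.foldl (fun acc x => PySem.List.insertBy b₁ x acc) acc
        = l.foldl (fun acc x => PySem.List.insertBy b₂ x acc) acc := by
  intro l
  induction l with
  | nil => intro acc _; rfl
  | cons x t ih =>
    intro acc h
    have hstep : PySem.List.insertBy b₁ x acc = PySem.List.insertBy b₂ x acc :=
      insertBy_congr b₁ b₂ x acc (fun y hy => h x (by simp) y (Or.inl hy))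
    simp only [List.foldl_cons, hstep]
    exact ih (PySem.List.insertBy b₂ x acc) (fun a ha y hy => by
      refine h a (by simp [ha]) y ?_
      rcases hy with hy | hy
      · rcases (PySem.List.mem_insertBy b₂ x y acc).1 hy with rfl | hy
        · exact Or.inr (by simp)
        · exact Or.inl hy
      · exact Or.inr (by simp [hy]))

-- dedup (first occurrences) of a ≤-sorted list is ≤-sorted
theorem pairwise_le_ofList (L : List String) (h : L.Pairwise (· ≤ ·)) :
    (PySem.Set.ofList L).Pairwise (· ≤ ·) := by
  induction L using List.reverseRecOn with
  | nil => simp [PySem.Set.ofList_nil]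
  | append_singleton M x ih =>
    rw [PySem.Set.ofList_append_singleton]
    rw [List.pairwise_append] at h
    obtain ⟨hM, -, hle⟩ := h
    unfold PySem.Set.add
    by_cases hm : x ∈ M
    · have hc : (PySem.Set.ofList M).contains x = true := by
        simp [PySem.Set.mem_ofList, hm]
      rw [if_pos hc]; exact ih hM
    · have hc : ¬ ((PySem.Set.ofList M).contains x = true) := by
        simp [PySem.Set.mem_ofList, hm]
      rw [if_neg hc, List.pairwise_append]
      refine ⟨ih hM, by simp, ?_⟩
      intro a ha b hb
      simp only [List.mem_singleton] at hb
      exact hb ▸ hle a ((PySem.Set.mem_ofList M a).1 ha) x (by simp)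

-- in a nodup ≤-sorted list, a maximal member is the last element
theorem getLast?_of_max (l : List String) (x : String) (hnd : l.Nodup)
    (hp : l.Pairwise (· ≤ ·)) (hx : x ∈ l) (hmax : ∀ y ∈ l, y ≤ x) :
    l.getLast? = some x := by
  induction l with
  | nil => simp at hx
  | cons a t ih =>
    rcases List.nodup_cons.1 hnd with ⟨hat, hndt⟩
    rcases List.pairwise_cons.1 hp with ⟨hale, hpt⟩
    cases t with
    | nil =>
      simp at hx ⊢
      exact hx.symm
    | cons b u =>
      rw [List.getLast?_cons_cons]
      rcases List.mem_cons.1 hx with rfl | hx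
      · -- x is the head: then b ≥ x and b ≤ x yet x ∉ b::u — impossible
        exfalso
        have hba : b ≤ x := hmax b (by simp)
        have hab : x ≤ b := hale b (by simp)
        have hxb : x = b := le_antisymm hab hba
        exact hat (hxb ▸ (by simp))
      · exact ih hndt hpt hx (fun y hy => hmax y (by simp [hy]))

-- the run-length fold over a ≤-sorted list yields (month, count) for the distinct months in order
theorem rl_fold_eq (L : List String) (h : L.Pairwise (· ≤ ·)) :
    L.foldl
      (fun res m =>
        match res.getLast? with
        | some last => if last.1 == m then res.dropLast ++ [(m, last.2 + 1)] else res ++ [(m, (1 : Int))]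
        | none => res ++ [(m, (1 : Int))])
      []
      = (PySem.Set.ofList L).map (fun k => (k, (L.count k : Int))) := by
  induction L using List.reverseRecOn with
  | nil => simp [PySem.Set.ofList_nil]
  | append_singleton M x ih =>
    rw [List.pairwise_append] at h
    obtain ⟨hM, -, hle'⟩ := h
    have hle : ∀ a ∈ M, a ≤ x := fun a ha => hle' a ha x (by simp)
    rw [List.foldl_append, ih hM, PySem.Set.ofList_append_singleton]
    simp only [List.foldl_cons, List.foldl_nil]
    have hnd := PySem.Set.nodup_ofList M
    have hpw := pairwise_le_ofList M hM
    by_cases hm : x ∈ M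
    · -- x already counted: the last run is extended
      have hcs : (PySem.Set.ofList M).contains x = true := by
        simp [PySem.Set.mem_ofList, hm]
      have hadd : (PySem.Set.ofList M).add x = PySem.Set.ofList M := by
        unfold PySem.Set.add; rw [if_pos hcs]
      have hlast : (PySem.Set.ofList M).getLast? = some x :=
        getLast?_of_max _ x hnd hpw ((PySem.Set.mem_ofList M x).2 hm)
          (fun y hy => hle y ((PySem.Set.mem_ofList M y).1 hy))
      have hne : PySem.Set.ofList M ≠ [] := by
        intro h0; rw [h0] at hlast; simp at hlast
      have hgl : (PySem.Set.ofList M).getLast hne = x := by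
        have := List.getLast?_eq_some_getLast (l := PySem.Set.ofList M) hne
        rw [hlast] at this; exact (Option.some_inj.1 this).symm
      have hdecomp : (PySem.Set.ofList M).dropLast ++ [x] = PySem.Set.ofList M := by
        conv_rhs => rw [← List.dropLast_append_getLast hne, hgl]
      simp only [List.getLast?_map, hlast, Option.map_some, beq_self_eq_true, if_true]
      rw [hadd]
      conv_rhs => rw [← hdecomp]
      rw [← hdecomp]
      have hndD : ((PySem.Set.ofList M).dropLast).Nodup ∧ x ∉ (PySem.Set.ofList M).dropLast := by
        rw [← hdecomp] at hnd
        rcases List.nodup_append.1 hnd with ⟨h1, -, h2⟩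
        exact ⟨h1, fun hx => h2 x hx x (by simp) rfl⟩
      simp only [List.map_append, List.map_cons, List.map_nil, List.dropLast_concat]
      congr 1
      · apply List.map_congr_left
        intro k hk
        have hxk : ¬ (x = k) := fun he => hndD.2 (he ▸ hk)
        simp [List.count_append, hxk]
      · simp [List.count_append]
    · -- new month: a fresh run of length 1 is appended
      have hcs : ¬ ((PySem.Set.ofList M).contains x = true) := by
        simp [PySem.Set.mem_ofList, hm]
      have hadd : (PySem.Set.ofList M).add x = PySem.Set.ofList M ++ [x] := by
        unfold PySem.Set.add; rw [if_neg hcs]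
      have hcx : M.count x = 0 := List.count_eq_zero_of_not_mem hm
      have hmapseq : ∀ k ∈ PySem.Set.ofList M,
          (k, ((M ++ [x]).count k : Int)) = (k, (M.count k : Int)) := by
        intro k hk
        have hxk : ¬ (x = k) := fun he => hm (he ▸ (PySem.Set.mem_ofList M k).1 hk)
        simp [List.count_append, hxk]
      rw [hadd, List.map_append]
      rw [List.map_congr_left hmapseq]
      cases hS : (PySem.Set.ofList M).getLast? with
      | none =>
        have : PySem.Set.ofList M = [] := List.getLast?_eq_none_iff.1 hS
        simp only [this, List.map_nil, List.nil_append]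
        simp [List.count_append, hcx]
      | some l0 =>
        have hl0 : l0 ∈ M := (PySem.Set.mem_ofList M l0).1 (List.mem_of_getLast? hS)
        have hl0x : (l0 == x) = false := by
          simp only [beq_eq_false_iff_ne]; intro he; exact hm (he ▸ hl0)
        simp only [List.getLast?_map, hS, Option.map_some, hl0x, Bool.false_eq_true, if_false]
        simp [List.count_append, hcx]

-- the assembled equivalence
theorem sessions_by_month_main_eq (entities : List (String × List (List (String × String)))) :
    sessions_by_month entities = sessions_by_month_alt entities := by
  classical
  set sessions := (PySem.Dict.mk entities).getD "sessions" [] with hsess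
  set p : List (String × String) → Bool := fun s => (PySem.Dict.mk s).getD "date" "" != "" with hp
  set f : List (String × String) → String :=
    fun s => PySem.Str.slice ((PySem.Dict.mk s).getD "date" "") none (some 7) with hf
  set months := (sessions.filter p).map f with hmonths
  set L := PySem.List.sorted months (fun x => x) with hL
  have hLpw : L.Pairwise (· ≤ ·) := PySem.List.sorted_pairwise months (fun x => x)
  have hLperm : L.Perm months := PySem.List.sorted_perm months (fun x => x) false
  -- B's value: descending list of (distinct month, multiplicity)
  have hB : sessions_by_month_alt entities
      = ((PySem.Set.ofList L).map (fun k => (k, (months.count k : Int)))).reverse := by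
    show (L.foldl _ []).reverse = _
    rw [rl_fold_eq L hLpw]
    congr 1
    exact List.map_congr_left (fun k _ => by rw [hLperm.count_eq])
  -- A's dict is the month counter
  have hA1 : sessions_by_month entities
      = ((PySem.Dict.counter months).items).foldl
          (fun acc x => PySem.List.insertBy pyPairRevBefore x acc) [] := by
    show (sessions.foldl _ PySem.Dict.empty).items.foldl _ [] = _
    rw [foldl_modify_filter_map p f sessions PySem.Dict.empty]
    rfl
  set items := (PySem.Set.ofList months).map (fun k => (k, (months.count k : Int))) with hitems
  have hitems' : (PySem.Dict.counter months).items = items := PySem.Dict.items_counter months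
  -- the hand-rolled tuple comparison agrees with the fst-key comparison on the counter's items
  have hagree : ∀ a ∈ items, ∀ y : String × Int, (y ∈ ([] : List (String × Int)) ∨ y ∈ items) →
      pyPairRevBefore a y = decide (y.1 < a.1) := by
    rintro a ha y (hy | hy)
    · simp at hy
    · rw [hitems] at ha hy
      obtain ⟨k, hk, rfl⟩ := List.mem_map.1 ha
      obtain ⟨k', hk', rfl⟩ := List.mem_map.1 hy
      by_cases hkk : k' = k
      · subst hkk
        simp [pyPairRevBefore]
      · simp [pyPairRevBefore, hkk]
  have hA2 : sessions_by_month entities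
      = PySem.List.sorted items (fun x => x.1) true := by
    rw [hA1, hitems', foldl_insertBy_congr pyPairRevBefore (fun a b => decide (b.1 < a.1)) items [] hagree,
      ← PySem.List.sorted_rev_eq_foldl_insertBy items (fun x => x.1)]
  rw [hA2, hB]
  apply PySem.List.sorted_rev_eq_of_perm_of_pairwise_gt
  · -- permutation: same distinct months, same counts
    refine (List.reverse_perm _).trans (List.Perm.map _ ?_)
    exact (List.perm_ext_iff_of_nodup (PySem.Set.nodup_ofList L) (PySem.Set.nodup_ofList months)).2
      (fun a => by rw [PySem.Set.mem_ofList, PySem.Set.mem_ofList, hLperm.mem_iff])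
  · -- keys strictly descending after the reverse
    rw [List.pairwise_reverse]
    rw [List.pairwise_map]
    have hlt : (PySem.Set.ofList L).Pairwise (· < ·) := by
      have hnd := PySem.Set.nodup_ofList L
      have hle := pairwise_le_ofList L hLpw
      exact (List.Pairwise.and hnd hle).imp (fun h => lt_of_le_of_ne h.2 h.1)
    exact hlt.imp (fun h => h)

-- ===== VERDICT (by name: the statement is the Claim_ definition above) =====
theorem sessions_by_month_spec : Claim_equal_sessions_by_month := by
  intro entities _
  unfold Spec_sessions_by_month
  exact sessions_by_month_main_eq entities
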